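-- pv_equiv track=rewrite | github.com/GAOChengzhan/CSE258_Web_Mining_and_Recommder_System | midterm/midterm.py | feature5
-- ===== SOURCE A (Python) =====
-- def feature5(sentence):
--     ans=[1]
--     lenChar=len(sentence)
--     countExclamation=0
--     numCapital=0
--     for c in sentence:
--         if c=='!':
--             countExclamation+=1
--         if c.isupper():
--             numCapital+=1
--     ans.extend([lenChar,countExclamation,numCapital])
--     return ans
-- ===== SOURCE B (Python) =====
-- def feature5(sentence):
--     # Build a character histogram once; read every feature off the table.
--     freq = {}
--     for c in sentence:
--         freq[c] = freq.get(c, 0) + 1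
--     return [1,
--             sum(freq.values()),
--             freq.get('!', 0),
--             sum(v for c, v in freq.items() if c.isupper())]
-- ===== Notes on version B (the rewrite author's own statement) =====
-- stated objective: alternative
-- what changed: A's fused loop with per-feature accumulators is replaced by a character histogram built once, from which all three features are derived: length as the sum of all counts, exclamation count as a single table lookup, and capital count by summing the counts of the distinct uppercase keys.
import Mathlib
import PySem

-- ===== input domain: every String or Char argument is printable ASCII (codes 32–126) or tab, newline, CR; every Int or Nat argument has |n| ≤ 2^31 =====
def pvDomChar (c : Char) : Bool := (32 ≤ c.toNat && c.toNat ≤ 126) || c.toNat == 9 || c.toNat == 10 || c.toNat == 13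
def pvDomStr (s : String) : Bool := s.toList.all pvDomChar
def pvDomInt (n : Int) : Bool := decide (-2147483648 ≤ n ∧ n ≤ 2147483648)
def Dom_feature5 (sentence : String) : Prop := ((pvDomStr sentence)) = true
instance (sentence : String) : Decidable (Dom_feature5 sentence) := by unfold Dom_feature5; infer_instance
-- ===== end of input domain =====

-- B replaces A's fused counting loop with a character histogram built once, from which
-- all three features are read (sum of counts, one lookup, sum over distinct uppercase keys).


-- ===== PORT A =====
-- one pass over the characters, two manual accumulators, same branch order as A
def feature5 (sentence : String) : List Int :=
  let ans : List Int := [1]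
  let lenChar : Int := PySem.Str.len sentence
  let counts : Int × Int :=
    sentence.toList.foldl (fun (p : Int × Int) c =>
      let p := if c == '!' then (p.1 + 1, p.2) else p
      if PySem.Chars.isupper c then (p.1, p.2 + 1) else p) (0, 0)
  ans ++ [lenChar, counts.1, counts.2]

-- ===== PORT B =====
-- freq = {}; for c in sentence: freq[c] = freq.get(c, 0) + 1
-- return [1, sum(freq.values()), freq.get('!', 0), sum(v for c, v in freq.items() if c.isupper())]
def feature5_alt (sentence : String) : List Int :=
  let freq : PySem.Dict Char Int :=
    sentence.toList.foldl (fun d c => d.insert c (d.getD c 0 + 1)) PySem.Dict.empty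
  [1, freq.values.sum, freq.getD '!' 0,
   ((freq.items.filter (fun p => PySem.Chars.isupper p.1)).map (·.2)).sum]

-- ===== PRECONDITION & SPEC =====
def Spec_feature5 (sentence : String) (out : List Int) : Prop := out = feature5_alt sentence
instance (sentence : String) (out : List Int) : Decidable (Spec_feature5 sentence out) := by unfold Spec_feature5; infer_instance

-- ===== CLAIM (what is proved, stated in full; the proofs are below) =====
def Claim_equal_feature5 : Prop := ∀ (sentence : String), Dom_feature5 sentence → Spec_feature5 sentence (feature5 sentence)

-- ===== LEMMAS AND PROOFS =====

-- A's fused loop computes ('!' count, uppercase count).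
theorem fold_counts (l : List Char) : ∀ (p : Int × Int),
    l.foldl (fun (p : Int × Int) c =>
      let p := if c == '!' then (p.1 + 1, p.2) else p
      if PySem.Chars.isupper c then (p.1, p.2 + 1) else p) p
    = (p.1 + l.count '!', p.2 + l.countP (fun c => PySem.Chars.isupper c)) := by
  induction l with
  | nil => intro p; simp
  | cons h t ih =>
    intro p
    simp only [List.foldl_cons, List.count_cons, List.countP_cons, ih]
    by_cases h1 : h = '!' <;> by_cases h2 : PySem.Chars.isupper h = true <;>
      simp [h1, h2, show PySem.Chars.isupper '!' = false from by decide] <;> ring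

-- Summing l.count over a nodup list of exactly l's elements, restricted by p, gives l.countP p.
theorem sum_count_filter (p : Char → Bool) :
    ∀ (s l : List Char), s.Nodup → (∀ x, x ∈ s ↔ x ∈ l) →
      ((s.filter p).map (fun k => (l.count k : Int))).sum = (l.countP p : Int) := by
  intro s
  induction s with
  | nil =>
    intro l _ hm
    have : l = [] := List.eq_nil_iff_forall_not_mem.mpr (fun x hx => by simpa using (hm x).mpr hx)
    simp [this]
  | cons k t ih =>
    intro l hnd hm
    have hk : k ∉ t := (List.nodup_cons.mp hnd).1
    have hndt : t.Nodup := (List.nodup_cons.mp hnd).2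
    set l' := l.filter (fun x => !(x == k)) with hl'
    have hmt : ∀ x, x ∈ t ↔ x ∈ l' := by
      intro x
      constructor
      · intro hx
        have hxk : x ≠ k := fun h => hk (h ▸ hx)
        simp [hl', List.mem_filter, (hm x).mp (List.mem_cons_of_mem _ hx), hxk]
      · intro hx
        rcases List.mem_filter.mp hx with ⟨hxl, hxk⟩
        have hxk' : x ≠ k := by simpa using hxk
        rcases List.mem_cons.mp ((hm x).mpr hxl) with h | h
        · exact absurd h hxk'
        · exact h
    have hcount : ∀ x ∈ t, l.count x = l'.count x := by
      intro x hx
      have hxk : x ≠ k := fun h => hk (h ▸ hx)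
      simp [hl', List.count_filter, hxk]
    have hsplit : (l.countP p : Int)
        = (if p k then (l.count k : Int) else 0) + (l'.countP p : Int) := by
      have h1 : l.countP p = (l.filter (fun x => x == k)).countP p + l'.countP p := by
        simpa [hl'] using List.countP_eq_countP_filter_add l p (fun x => x == k)
      have h2 : (l.filter (fun x => x == k)).countP p = if p k then l.count k else 0 := by
        by_cases hp : p k
        · rw [if_pos hp]
          have : ∀ x ∈ l.filter (fun x => x == k), p x = true := by
            intro x hx
            have : x = k := by simpa using (List.mem_filter.mp hx).2
            simpa [this] using hp
          rw [List.countP_eq_length_filter, List.filter_eq_self.mpr this]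
          simp [List.count, List.countP_eq_length_filter]
        · rw [if_neg hp]
          rw [List.countP_eq_length_filter]
          have : ∀ x ∈ l.filter (fun x => x == k), ¬ p x = true := by
            intro x hx
            have : x = k := by simpa using (List.mem_filter.mp hx).2
            simpa [this] using hp
          simp [List.filter_eq_nil_iff.mpr this]
      rw [h1, h2]
      by_cases hp : p k <;> simp [hp]
    have hmap : (t.filter p).map (fun k => (l.count k : Int))
        = (t.filter p).map (fun k => (l'.count k : Int)) := by
      apply List.map_congr_left
      intro x hx
      rw [hcount x (List.mem_of_mem_filter hx)]
    by_cases hp : p k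
    · simp only [List.filter_cons, hp, if_pos, List.map_cons, List.sum_cons]
      rw [hmap, ih l' hndt hmt, hsplit, if_pos hp]
    · simp only [List.filter_cons, hp]
      simp only [Bool.false_eq_true, if_false]
      rw [hmap, ih l' hndt hmt, hsplit, if_neg hp]
      simp

-- ===== VERDICT (by name: the statement is the Claim_ definition above) =====
theorem feature5_spec : Claim_equal_feature5 := by
  intro sentence _
  unfold Spec_feature5 feature5 feature5_alt
  simp only [fold_counts, PySem.Dict.foldl_insert_getD_add_one_eq_counter]
  set l := sentence.toList with hl
  have hitems := PySem.Dict.items_counter (xs := l)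
  have hnd : (PySem.Set.ofList l).Nodup := PySem.Set.nodup_ofList l
  have hmem : ∀ x, x ∈ PySem.Set.ofList l ↔ x ∈ l := fun x => PySem.Set.mem_ofList l x
  -- values sum = length
  have hvals : (PySem.Dict.counter l).values.sum = (l.length : Int) := by
    rw [show (PySem.Dict.counter l).values = (PySem.Dict.counter l).items.map (·.2) from rfl,
      hitems, List.map_map]
    have := sum_count_filter (fun _ => true) (PySem.Set.ofList l) l hnd hmem
    simpa [Function.comp, List.countP_true] using this
  -- caps sum
  have hcaps : (((PySem.Dict.counter l).items.filter (fun p => PySem.Chars.isupper p.1)).map (·.2)).sum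
      = (l.countP (fun c => PySem.Chars.isupper c) : Int) := by
    rw [hitems, List.filter_map, List.map_map]
    have := sum_count_filter (fun c => PySem.Chars.isupper c) (PySem.Set.ofList l) l hnd hmem
    simpa [Function.comp] using this
  simp only [PySem.Dict.getD_counter, PySem.Str.len_eq, hl]
  rw [hvals, hcaps]
  simp [hl]
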